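-- pv_equiv track=rewrite | github.com/igornazarenko434/hebrew-idiom-detection | src/utils/error_analysis.py | get_span_indices
-- ===== SOURCE A (Python) =====
-- from typing import List, Tuple, Optional, Dict
--
-- def get_span_indices(tags: List[str]) -> Optional[List[Tuple[int, int]]]:
--     """
--     Extract all span boundaries from IOB tags.
--
--     Args:
--         tags: List of IOB2 tags ['O', 'B-IDIOM', 'I-IDIOM', ...]
--
--     Returns:
--         List of (start_idx, end_idx) tuples (exclusive end), or None if no spans
--
--     Example:
--         tags = ['O', 'B-IDIOM', 'I-IDIOM', 'O', 'B-IDIOM', 'O']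
--         returns: [(1, 3), (4, 5)]
--     """
--     if not tags:
--         return None
--
--     spans = []
--     start = None
--
--     for i, tag in enumerate(tags):
--         if tag == 'B-IDIOM':
--             # Close previous span if exists
--             if start is not None:
--                 spans.append((start, i))
--             start = i
--         elif tag == 'O' and start is not None:
--             # Close current span
--             spans.append((start, i))
--             start = None
--         # I-IDIOM continues the span, no action needed
--
--     # Close final span if sentence ends with idiom
--     if start is not None:
--         spans.append((start, len(tags)))
--
--     return spans if spans else None
-- ===== SOURCE B (Python) =====
-- from typing import List, Tuple, Optional
--
--
-- def get_span_indices(tags: List[str]) -> Optional[List[Tuple[int, int]]]: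
--     """Extract IOB2 span boundaries: start indices first, then a forward scan per start."""
--     starts = [i for i, t in enumerate(tags) if t == 'B-IDIOM']
--     spans = []
--     for s in starts:
--         e = s + 1
--         while e < len(tags) and tags[e] not in ('B-IDIOM', 'O'):
--             e += 1
--         spans.append((s, e))
--     return spans if spans else None
-- ===== Notes on version B (the rewrite author's own statement) =====
-- stated objective: alternative
-- what changed: Replaces the single stateful pass (open-span state machine) by first collecting all B-IDIOM start indices, then finding each span's end with a forward scan to the next B-IDIOM/O tag or the end of the list.
import Mathlib
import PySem

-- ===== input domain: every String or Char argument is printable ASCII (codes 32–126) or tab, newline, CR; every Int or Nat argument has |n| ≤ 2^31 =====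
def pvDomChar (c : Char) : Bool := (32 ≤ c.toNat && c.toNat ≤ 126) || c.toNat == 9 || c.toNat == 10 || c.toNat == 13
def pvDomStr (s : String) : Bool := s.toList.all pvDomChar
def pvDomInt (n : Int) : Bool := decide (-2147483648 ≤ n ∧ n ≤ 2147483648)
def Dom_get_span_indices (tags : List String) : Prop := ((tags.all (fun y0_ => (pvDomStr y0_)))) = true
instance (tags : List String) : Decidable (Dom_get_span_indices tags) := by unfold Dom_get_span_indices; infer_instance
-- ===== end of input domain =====

-- B replaces A's single stateful pass by collecting all B-IDIOM start indices and
-- scanning forward from each start to the next B-IDIOM/O tag (alternative decomposition, same cost).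

-- ===== PORT A =====
-- literal transliteration of A: one pass over enumerate(tags) with state (spans, start),
-- then the final close; loop body and final close are the named helpers stepA / finishA
def stepA (st : List (Int × Int) × Option Int) (p : Int × String) : List (Int × Int) × Option Int :=
  if p.2 = "B-IDIOM" then
    match st.2 with
    | some s => (st.1 ++ [(s, p.1)], some p.1)
    | none => (st.1, some p.1)
  else if p.2 = "O" then
    match st.2 with
    | some s => (st.1 ++ [(s, p.1)], none)
    | none => st
  else st

def finishA (n : Int) (r : List (Int × Int) × Option Int) : List (Int × Int) :=
  match r.2 with
  | some s => r.1 ++ [(s, n)]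
  | none => r.1

def get_span_indices (tags : List String) : Option (List (Int × Int)) :=
  if tags.isEmpty then none
  else
    let spans := finishA (tags.length : Int) ((PySem.List.enumerate tags).foldl stepA ([], none))
    if spans.isEmpty then none else some spans

-- ===== PORT B =====
-- the while-loop of Source B: advance e while e < len(tags) and tags[e] not in ('B-IDIOM','O')
def scanEnd (tags : List String) (e : Int) : Int :=
  if h : e < (tags.length : Int) ∧
      PySem.List.pyGetD tags e "" ≠ "B-IDIOM" ∧ PySem.List.pyGetD tags e "" ≠ "O" then
    scanEnd tags (e + 1)
  else e
termination_by ((tags.length : Int) - e).toNat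
decreasing_by omega

def get_span_indices_alt (tags : List String) : Option (List (Int × Int)) :=
  let starts := ((PySem.List.enumerate tags).filter (fun p => p.2 = "B-IDIOM")).map (fun p => p.1)
  let spans := starts.map (fun s => (s, scanEnd tags (s + 1)))
  if spans.isEmpty then none else some spans

-- ===== PRECONDITION & SPEC =====
def Spec_get_span_indices (tags : List String) (out : Option (List (Int × Int))) : Prop := out = get_span_indices_alt tags
instance (tags : List String) (out : Option (List (Int × Int))) : Decidable (Spec_get_span_indices tags out) := by unfold Spec_get_span_indices; infer_instance

-- ===== CLAIM (what is proved, stated in full; the proofs are below) =====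
def Claim_equal_get_span_indices : Prop := ∀ (tags : List String), Dom_get_span_indices tags → Spec_get_span_indices tags (get_span_indices tags)

-- ===== LEMMAS AND PROOFS =====

/-- length of the leading run of tags that continue a span (neither B-IDIOM nor O) -/
def contLen : List String → Nat
  | [] => 0
  | t :: rest => if t = "B-IDIOM" ∨ t = "O" then 0 else contLen rest + 1

/-- reference span list for a suffix starting at absolute index i -/
def spansB : List String → Int → List (Int × Int)
  | [], _ => []
  | t :: rest, i =>
      if t = "B-IDIOM" then (i, i + 1 + (contLen rest : Int)) :: spansB rest (i + 1)
      else spansB rest (i + 1)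

lemma pyGetD_append_length (pre : List String) (t : String) (rest : List String) :
    PySem.List.pyGetD (pre ++ t :: rest) (pre.length : Int) "" = t := by
  rw [PySem.List.pyGetD_natCast]
  simp [List.getD, List.getElem?_append_right]

lemma scanEnd_eq (suf : List String) : ∀ (pre : List String),
    scanEnd (pre ++ suf) (pre.length : Int) = (pre.length : Int) + (contLen suf : Int) := by
  induction suf with
  | nil =>
    intro pre
    rw [scanEnd]
    simp [contLen]
  | cons t rest ih =>
    intro pre
    rw [scanEnd]
    have hget := pyGetD_append_length pre t rest
    by_cases hstop : t = "B-IDIOM" ∨ t = "O"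
    · rw [dif_neg (by rw [hget]; tauto)]
      simp [contLen, hstop]
    · rw [dif_pos ⟨by simp, by rw [hget]; tauto, by rw [hget]; tauto⟩]
      have h1 : ((pre.length : Int) + 1) = (((pre ++ [t]).length : Nat) : Int) := by simp
      have h2 : pre ++ t :: rest = (pre ++ [t]) ++ rest := by simp
      rw [h1, h2, ih (pre ++ [t])]
      simp [contLen, hstop]
      push_cast
      ring

lemma alt_map_eq (suf : List String) : ∀ (pre : List String),
    (((PySem.List.enumerate suf (pre.length : Int)).filter
        (fun p => p.2 = "B-IDIOM")).map (fun p => p.1)).map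
      (fun s => (s, scanEnd (pre ++ suf) (s + 1)))
    = spansB suf (pre.length : Int) := by
  induction suf with
  | nil => intro pre; simp [PySem.List.enumerate_nil, spansB]
  | cons t rest ih =>
    intro pre
    rw [PySem.List.enumerate_cons]
    have h1 : ((pre.length : Int) + 1) = (((pre ++ [t]).length : Nat) : Int) := by simp
    have h2 : pre ++ t :: rest = (pre ++ [t]) ++ rest := by simp
    by_cases hB : t = "B-IDIOM"
    · subst hB
      rw [List.filter_cons_of_pos (by simp)]
      simp only [List.map_cons, spansB, if_pos rfl]
      have hend : scanEnd (pre ++ "B-IDIOM" :: rest) ((pre.length : Int) + 1)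
          = (pre.length : Int) + 1 + (contLen rest : Int) := by
        rw [h2, h1, scanEnd_eq rest (pre ++ ["B-IDIOM"])]
      rw [hend]
      congr 1
      simp only [h2, h1]
      exact ih (pre ++ ["B-IDIOM"])
    · rw [List.filter_cons_of_neg (by simp [hB])]
      simp only [spansB, if_neg hB]
      simp only [h2, h1]
      exact ih (pre ++ [t])

/-- characterisation of A's fold with final closing, relative to a suffix -/
lemma a_fold_eq (suf : List String) : ∀ (pre : List String) (acc : List (Int × Int)) (start : Option Int),
    finishA (((pre ++ suf).length : Nat) : Int)
      ((PySem.List.enumerate suf (pre.length : Int)).foldl stepA (acc, start))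
    = acc ++ (match start with
        | some s => (s, (pre.length : Int) + (contLen suf : Int)) :: spansB suf (pre.length : Int)
        | none => spansB suf (pre.length : Int)) := by
  induction suf with
  | nil =>
    intro pre acc start
    cases start <;> simp [PySem.List.enumerate_nil, contLen, spansB, finishA]
  | cons t rest ih =>
    intro pre acc start
    rw [PySem.List.enumerate_cons, List.foldl_cons]
    have h1 : ((pre.length : Int) + 1) = (((pre ++ [t]).length : Nat) : Int) := by simp
    have h2 : pre ++ t :: rest = (pre ++ [t]) ++ rest := by simp
    by_cases hB : t = "B-IDIOM"
    · cases start with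
      | some s =>
        have hstep : stepA (acc, some s) ((pre.length : Int), t)
            = (acc ++ [(s, (pre.length : Int))], some (pre.length : Int)) := by
          simp [stepA, hB]
        rw [hstep, h1, h2, ih (pre ++ [t])]
        simp only [spansB, contLen, if_pos (Or.inl hB), hB, if_pos rfl]
        simp [← h1, List.append_assoc]
      | none =>
        have hstep : stepA (acc, none) ((pre.length : Int), t)
            = (acc, some (pre.length : Int)) := by
          simp [stepA, hB]
        rw [hstep, h1, h2, ih (pre ++ [t])]
        simp only [spansB, contLen, hB, if_pos rfl]
        simp [← h1]
    · by_cases hO : t = "O"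
      · cases start with
        | some s =>
          have hstep : stepA (acc, some s) ((pre.length : Int), t)
              = (acc ++ [(s, (pre.length : Int))], none) := by
            simp [stepA, hB, hO]
          rw [hstep, h1, h2, ih (pre ++ [t])]
          simp only [spansB, contLen, if_pos (Or.inr hO), if_neg hB]
          simp [← h1, List.append_assoc]
        | none =>
          have hstep : stepA (acc, none) ((pre.length : Int), t) = (acc, none) := by
            simp [stepA, hB, hO]
          rw [hstep, h1, h2, ih (pre ++ [t])]
          simp only [spansB, if_neg hB]
          simp [← h1]
      · have hcont : contLen (t :: rest) = contLen rest + 1 := by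
          simp [contLen, hB, hO]
        cases start with
        | some s =>
          have hstep : stepA (acc, some s) ((pre.length : Int), t) = (acc, some s) := by
            simp [stepA, hB, hO]
          rw [hstep, h1, h2, ih (pre ++ [t])]
          simp only [spansB, if_neg hB, hcont]
          simp [← h1]
          push_cast; ring_nf
        | none =>
          have hstep : stepA (acc, none) ((pre.length : Int), t) = (acc, none) := by
            simp [stepA, hB, hO]
          rw [hstep, h1, h2, ih (pre ++ [t])]
          simp only [spansB, if_neg hB]
          simp [← h1]

-- ===== VERDICT (by name: the statement is the Claim_ definition above) =====
theorem get_span_indices_spec : Claim_equal_get_span_indices := by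
  intro tags _
  unfold Spec_get_span_indices get_span_indices get_span_indices_alt
  cases tags with
  | nil => simp [PySem.List.enumerate_nil]
  | cons t rest =>
    have hA := a_fold_eq (t :: rest) [] ([] : List (Int × Int)) (none : Option Int)
    have hB := alt_map_eq (t :: rest) []
    simp only [List.nil_append, List.length_nil, Nat.cast_zero] at hA hB
    simp only [List.isEmpty_cons, Bool.false_eq_true, if_false]
    rw [hA, hB]
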